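-- pv_equiv track=rewrite | github.com/SilvaDenisVictor/emissor_automatic | struture_order.py | completar_ncm
-- ===== SOURCE A (Python) =====
-- def completar_ncm(ncm):
--   final_ncm = ncm
--
--   while len(final_ncm) < 10:
--     final_ncm += '_'
--
--   for index, c in enumerate(final_ncm):
--     if c == "_":
--       if index == 4 or index == 7:
--         final_ncm = final_ncm.replace("_", ".", 1)
--       else:
--         final_ncm = final_ncm.replace("_", "0", 1)
--
--   return final_ncm
-- ===== SOURCE B (Python) =====
-- def completar_ncm(ncm):
--     size = max(len(ncm), 10)
--     result = ['.' if i == 4 or i == 7 else '0' for i in range(size)]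
--     for i, c in enumerate(ncm):
--         if c != '_':
--             result[i] = c
--     return ''.join(result)
-- ===== Notes on version B (the rewrite author's own statement) =====
-- stated objective: simpler
-- what changed: Instead of padding with underscores and repeatedly calling first-occurrence str.replace inside the loop, B prefills a template list ('.' at indices 4 and 7, '0' elsewhere) and overlays the non-underscore input characters in one pass, joining at the end.
import Mathlib
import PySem

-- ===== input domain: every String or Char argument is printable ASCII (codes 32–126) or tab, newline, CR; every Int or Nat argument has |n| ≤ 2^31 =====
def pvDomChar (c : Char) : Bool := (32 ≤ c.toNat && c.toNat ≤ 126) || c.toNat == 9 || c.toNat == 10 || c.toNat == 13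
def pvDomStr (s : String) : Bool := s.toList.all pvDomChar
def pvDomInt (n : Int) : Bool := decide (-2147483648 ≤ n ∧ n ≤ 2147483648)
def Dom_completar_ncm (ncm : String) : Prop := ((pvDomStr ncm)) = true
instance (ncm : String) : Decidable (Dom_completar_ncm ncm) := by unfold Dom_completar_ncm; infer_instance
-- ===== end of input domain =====

-- B prefills the '.'-and-'0' template and overlays the input characters, replacing A's pad-then-replace loop; objective: simpler.


-- ===== PORT A =====
-- final_ncm.replace("_", r, 1): first-occurrence single-char replace, ported by hand (exact for a
-- one-character pattern with count 1).
def pvReplFirst (t r : Char) : List Char → List Char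
  | [] => []
  | c :: cs => if c = t then r :: cs else c :: pvReplFirst t r cs

-- while len(final_ncm) < 10: final_ncm += '_'
def pvPad (s : List Char) : List Char :=
  if s.length < 10 then pvPad (s ++ ['_']) else s
  termination_by 10 - s.length
  decreasing_by simp_all; omega

def completar_ncm (ncm : String) : String :=
  let padded := pvPad ncm.toList
  String.mk ((PySem.List.enumerate padded 0).foldl
    (fun s ic =>
      if ic.2 = '_' then
        if ic.1 = 4 ∨ ic.1 = 7 then pvReplFirst '_' '.' s else pvReplFirst '_' '0' s
      else s) padded)

-- ===== PORT B =====
def completar_ncm_alt (ncm : String) : String :=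
  let size := max ncm.toList.length 10
  let template := (List.range size).map (fun i => if i = 4 ∨ i = 7 then '.' else '0')
  String.mk ((PySem.List.enumerate ncm.toList 0).foldl
    (fun r ic => if ic.2 ≠ '_' then r.set ic.1.toNat ic.2 else r) template)

-- ===== PRECONDITION & SPEC =====
def Spec_completar_ncm (ncm : String) (out : String) : Prop := out = completar_ncm_alt ncm
instance (ncm : String) (out : String) : Decidable (Spec_completar_ncm ncm out) := by unfold Spec_completar_ncm; infer_instance

-- ===== CLAIM (what is proved, stated in full; the proofs are below) =====
def Claim_equal_completar_ncm : Prop := ∀ (ncm : String), Dom_completar_ncm ncm → Spec_completar_ncm ncm (completar_ncm ncm)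

-- ===== LEMMAS AND PROOFS =====

-- the common normal form: char at absolute index k+j becomes '.'/'0' if '_', else itself
def pvOut : Nat → List Char → List Char
  | _, [] => []
  | i, c :: cs => (if c = '_' then (if i = 4 ∨ i = 7 then '.' else '0') else c) :: pvOut (i+1) cs

lemma pvPad_eq (s : List Char) : pvPad s = s ++ List.replicate (10 - s.length) '_' := by
  by_cases h : s.length < 10
  · rw [pvPad, if_pos h, pvPad_eq (s ++ ['_'])]
    have h2 : 10 - s.length = (10 - (s.length + 1)) + 1 := by omega
    rw [h2, List.replicate_succ]
    simp
  · rw [pvPad, if_neg h]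
    have h0 : 10 - s.length = 0 := by omega
    simp [h0]
  termination_by 10 - s.length
  decreasing_by simp_all; omega

lemma pvReplFirst_append (r : Char) (pre ys : List Char) (h : '_' ∉ pre) :
    pvReplFirst '_' r (pre ++ '_' :: ys) = pre ++ r :: ys := by
  induction pre with
  | nil => simp [pvReplFirst]
  | cons c cs ih =>
    simp at h
    have hc : ¬ c = '_' := fun e => h.1 e.symm
    simp [pvReplFirst, hc, ih h.2]

lemma length_pvOut (p : List Char) : ∀ k, (pvOut k p).length = p.length := by
  induction p with
  | nil => intro k; simp [pvOut]
  | cons c cs ih => intro k; simp [pvOut, ih]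

lemma A_fold (suffix : List Char) : ∀ pre : List Char, '_' ∉ pre →
    (PySem.List.enumerate suffix (pre.length : Int)).foldl
      (fun s ic =>
        if ic.2 = '_' then
          if ic.1 = 4 ∨ ic.1 = 7 then pvReplFirst '_' '.' s else pvReplFirst '_' '0' s
        else s) (pre ++ suffix) = pre ++ pvOut pre.length suffix := by
  induction suffix with
  | nil => intro pre h; simp [PySem.List.enumerate_nil, pvOut]
  | cons c cs ih =>
    intro pre h
    rw [PySem.List.enumerate_cons, List.foldl_cons]
    by_cases hc : c = '_'
    · subst hc
      by_cases h47 : pre.length = 4 ∨ pre.length = 7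
      · have h47i : ((pre.length : Int) = 4 ∨ (pre.length : Int) = 7) := by omega
        have hstep :
            (if ('_' : Char) = '_' then
              if (pre.length : Int) = 4 ∨ (pre.length : Int) = 7 then
                pvReplFirst '_' '.' (pre ++ '_' :: cs)
              else pvReplFirst '_' '0' (pre ++ '_' :: cs)
            else pre ++ '_' :: cs) = (pre ++ ['.']) ++ cs := by
          rw [if_pos rfl, if_pos h47i, pvReplFirst_append '.' pre cs h]
          simp
        rw [hstep]
        have hlen : ((pre ++ ['.']).length : Int) = (pre.length : Int) + 1 := by simp
        have hpre' : '_' ∉ pre ++ ['.'] := by simp [h]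
        have := ih (pre ++ ['.']) hpre'
        rw [hlen] at this
        rw [this]
        simp [pvOut, h47]
      · have h47i : ¬ ((pre.length : Int) = 4 ∨ (pre.length : Int) = 7) := by omega
        have hstep :
            (if ('_' : Char) = '_' then
              if (pre.length : Int) = 4 ∨ (pre.length : Int) = 7 then
                pvReplFirst '_' '.' (pre ++ '_' :: cs)
              else pvReplFirst '_' '0' (pre ++ '_' :: cs)
            else pre ++ '_' :: cs) = (pre ++ ['0']) ++ cs := by
          rw [if_pos rfl, if_neg h47i, pvReplFirst_append '0' pre cs h]
          simp
        rw [hstep]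
        have hlen : ((pre ++ ['0']).length : Int) = (pre.length : Int) + 1 := by simp
        have hpre' : '_' ∉ pre ++ ['0'] := by simp [h]
        have := ih (pre ++ ['0']) hpre'
        rw [hlen] at this
        rw [this]
        simp [pvOut, h47]
    · have hstep :
          (if c = '_' then
            if (pre.length : Int) = 4 ∨ (pre.length : Int) = 7 then
              pvReplFirst '_' '.' (pre ++ c :: cs)
            else pvReplFirst '_' '0' (pre ++ c :: cs)
          else pre ++ c :: cs) = (pre ++ [c]) ++ cs := by
        simp [hc]
      rw [hstep]
      have hlen : ((pre ++ [c]).length : Int) = (pre.length : Int) + 1 := by simp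
      have hpre' : '_' ∉ pre ++ [c] := by simp [h, Ne.symm hc]
      have := ih (pre ++ [c]) hpre'
      rw [hlen] at this
      rw [this]
      simp [pvOut, hc]

lemma pvOut_getElem (p : List Char) : ∀ (k j : Nat) (h : j < p.length),
    (pvOut k p)[j]'(by rw [length_pvOut]; exact h) =
      if p[j] = '_' then (if k + j = 4 ∨ k + j = 7 then '.' else '0') else p[j] := by
  induction p with
  | nil => intro k j h; simp at h
  | cons c cs ih =>
    intro k j h
    cases j with
    | zero => simp [pvOut]
    | succ j' =>
      simp only [pvOut, List.getElem_cons_succ]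
      rw [ih (k+1) j' (by simpa using h)]
      have : k + 1 + j' = k + (j' + 1) := by omega
      rw [this]

-- overlay: keep res but take non-underscore chars of xs
def pvOverlay : List Char → List Char → List Char
  | [], res => res
  | _ :: _, [] => []
  | c :: cs, d :: ds => (if c ≠ '_' then c else d) :: pvOverlay cs ds

lemma B_fold (xs : List Char) : ∀ (pre rest : List Char), xs.length ≤ rest.length →
    (PySem.List.enumerate xs (pre.length : Int)).foldl
      (fun r ic => if ic.2 ≠ '_' then r.set ic.1.toNat ic.2 else r) (pre ++ rest) =
    pre ++ pvOverlay xs rest := by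
  induction xs with
  | nil => intro pre rest _; simp [PySem.List.enumerate_nil, pvOverlay]
  | cons c cs ih =>
    intro pre rest h
    cases rest with
    | nil => simp at h
    | cons d ds =>
      rw [PySem.List.enumerate_cons, List.foldl_cons]
      by_cases hc : c = '_'
      · have hstep :
            (if (c ≠ '_') then (pre ++ d :: ds).set ((pre.length : Int)).toNat c
             else pre ++ d :: ds) = (pre ++ [d]) ++ ds := by
          rw [if_neg (by simp [hc])]
          simp
        rw [hstep]
        have hlen : ((pre ++ [d]).length : Int) = (pre.length : Int) + 1 := by simp
        have := ih (pre ++ [d]) ds (by simpa using h)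
        rw [hlen] at this
        rw [this]
        simp [pvOverlay, hc]
      · have hstep :
            (if (c ≠ '_') then (pre ++ d :: ds).set ((pre.length : Int)).toNat c
             else pre ++ d :: ds) = (pre ++ [c]) ++ ds := by
          rw [if_pos (by simp [hc])]
          simp
        rw [hstep]
        have hlen : ((pre ++ [c]).length : Int) = (pre.length : Int) + 1 := by simp
        have := ih (pre ++ [c]) ds (by simpa using h)
        rw [hlen] at this
        rw [this]
        simp [pvOverlay, hc]

lemma length_pvOverlay (xs : List Char) : ∀ res : List Char, xs.length ≤ res.length →
    (pvOverlay xs res).length = res.length := by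
  induction xs with
  | nil => intro res _; simp [pvOverlay]
  | cons c cs ih =>
    intro res h
    cases res with
    | nil => simp at h
    | cons d ds => simp [pvOverlay]; exact ih ds (by simpa using h)

lemma pvOverlay_getElem (xs : List Char) : ∀ (res : List Char) (j : Nat)
    (hlen : xs.length ≤ res.length) (hj : j < res.length),
    (pvOverlay xs res)[j]'(by rw [length_pvOverlay xs res hlen]; exact hj) =
      if h : j < xs.length then (if xs[j] ≠ '_' then xs[j] else res[j]) else res[j] := by
  induction xs with
  | nil => intro res j hlen hj; simp [pvOverlay]
  | cons c cs ih =>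
    intro res j hlen hj
    cases res with
    | nil => simp at hj
    | cons d ds =>
      cases j with
      | zero => simp [pvOverlay]
      | succ j' =>
        simp only [pvOverlay, List.getElem_cons_succ]
        rw [ih ds j' (by simpa using hlen) (by simpa using hj)]
        simp

lemma main_lists (xs : List Char) :
    pvOut 0 (pvPad xs) =
      pvOverlay xs ((List.range (max xs.length 10)).map (fun i => if i = 4 ∨ i = 7 then '.' else '0')) := by
  set tmpl := (List.range (max xs.length 10)).map (fun i => if i = 4 ∨ i = 7 then '.' else '0') with htmpl
  have hpad : pvPad xs = xs ++ List.replicate (10 - xs.length) '_' := pvPad_eq xs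
  have hplen : (pvPad xs).length = max xs.length 10 := by rw [hpad]; simp; omega
  have htlen : tmpl.length = max xs.length 10 := by simp [htmpl]
  have hxs_le : xs.length ≤ tmpl.length := by rw [htlen]; omega
  apply List.ext_getElem
  · rw [length_pvOut, hplen, length_pvOverlay xs tmpl hxs_le, htlen]
  · intro j h1 h2
    have hj : j < max xs.length 10 := by
      rw [length_pvOut, hplen] at h1; exact h1
    have hjp : j < (pvPad xs).length := by rw [hplen]; exact hj
    have hjt : j < tmpl.length := by rw [htlen]; exact hj
    rw [pvOut_getElem (pvPad xs) 0 j hjp, pvOverlay_getElem xs tmpl j hxs_le hjt]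
    have htget : tmpl[j]'hjt = if j = 4 ∨ j = 7 then '.' else '0' := by
      simp [htmpl]
    have hpget : (pvPad xs)[j]'hjp = if h : j < xs.length then xs[j] else '_' := by
      rw [List.getElem_of_eq hpad hjp]
      by_cases hlt : j < xs.length
      · rw [List.getElem_append_left hlt]; simp [hlt]
      · rw [List.getElem_append_right (by omega)]
        simp [hlt]
    rw [htget, hpget]
    by_cases hlt : j < xs.length
    · simp only [hlt, dif_pos]
      by_cases hu : xs[j] = '_' <;> simp [hu]
    · simp [hlt]

-- ===== VERDICT (by name: the statement is the Claim_ definition above) =====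
theorem completar_ncm_spec : Claim_equal_completar_ncm := by
  intro ncm _
  unfold Spec_completar_ncm completar_ncm completar_ncm_alt
  simp only []
  have hA := A_fold (pvPad ncm.toList) [] (by simp)
  simp only [List.length_nil, Nat.cast_zero, List.nil_append] at hA
  rw [hA]
  have hB := B_fold ncm.toList []
    ((List.range (max ncm.toList.length 10)).map (fun i => if i = 4 ∨ i = 7 then '.' else '0'))
    (by simp)
  simp only [List.length_nil, Nat.cast_zero, List.nil_append] at hB
  rw [hB]
  rw [main_lists]
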